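-- pv_equiv track=rewrite | github.com/ashebanow/dotfiles | bin/format_toml_tags.py | format_tags_array
-- ===== SOURCE A (Python) =====
-- def sort_tags_by_prefix(tags):
--     """Sort tags alphabetically while keeping prefix groups together."""
--     if not tags:
--         return []
--
--     # Group tags by prefix (everything before first colon)
--     prefix_groups = {}
--     no_prefix = []
--
--     for tag in tags:
--         if ':' in tag:
--             prefix = tag.split(':', 1)[0]
--             if prefix not in prefix_groups:
--                 prefix_groups[prefix] = []
--             prefix_groups[prefix].append(tag)
--         else:
--             no_prefix.append(tag)
--
--     # Sort within each prefix group
--     for prefix in prefix_groups: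
--         prefix_groups[prefix].sort()
--
--     # Sort tags without prefixes
--     no_prefix.sort()
--
--     # Combine: sorted prefixes, then their tags, then no-prefix tags
--     result = []
--     for prefix in sorted(prefix_groups.keys()):
--         result.extend(prefix_groups[prefix])
--     result.extend(no_prefix)
--
--     return result
--
-- def format_tags_array(tags, max_per_line=4, indent=""):
--     """Format a tags array with max_per_line tags per line."""
--     if not tags:
--         return "[]"
--
--     # Sort tags by prefix groups
--     sorted_tags = sort_tags_by_prefix(tags)
--
--     if len(sorted_tags) <= max_per_line:
--         # Single line if it fits
--         formatted_tags = ", ".join(f'"{tag}"' for tag in sorted_tags)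
--         return f'[ {formatted_tags},]'
--
--     # Multi-line format
--     lines = ["["]
--
--     for i in range(0, len(sorted_tags), max_per_line):
--         chunk = sorted_tags[i:i + max_per_line]
--         formatted_chunk = ", ".join(f'"{tag}"' for tag in chunk)
--         lines.append(f'  {formatted_chunk},')
--
--     lines.append("]")
--
--     return "\n".join(lines)
-- ===== SOURCE B (Python) =====
-- def format_tags_array(tags, max_per_line=4, indent=""):
--     """Format a tags array with max_per_line tags per line."""
--     if not tags:
--         return "[]"
--
--     # One composite-key sort: prefixed tags first (by prefix, then full tag),
--     # then no-prefix tags (by tag); '0'/'1' markers put prefixed tags first.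
--     def tag_key(tag):
--         if ':' in tag:
--             return ('0' + tag.split(':', 1)[0], tag)
--         return ('1', tag)
--
--     sorted_tags = sorted(tags, key=tag_key)
--
--     if len(sorted_tags) <= max_per_line:
--         return '[ ' + ", ".join(f'"{t}"' for t in sorted_tags) + ',]'
--
--     chunks = [sorted_tags[i:i + max_per_line]
--               for i in range(0, len(sorted_tags), max_per_line)]
--     return "\n".join(["["] + ['  ' + ", ".join(f'"{t}"' for t in c) + ',' for c in chunks] + ["]"])
-- ===== Notes on version B (the rewrite author's own statement) =====
-- stated objective: simpler
-- what changed: Replaces A's dict-grouping helper (group by prefix, sort each bucket, concatenate over sorted prefixes, then sorted no-prefix tags) with a single sorted() call using the composite key (0, prefix, tag) for prefixed tags and (1, tag, '') for the rest, plus a comprehension-based formatting tail.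
import Mathlib
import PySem

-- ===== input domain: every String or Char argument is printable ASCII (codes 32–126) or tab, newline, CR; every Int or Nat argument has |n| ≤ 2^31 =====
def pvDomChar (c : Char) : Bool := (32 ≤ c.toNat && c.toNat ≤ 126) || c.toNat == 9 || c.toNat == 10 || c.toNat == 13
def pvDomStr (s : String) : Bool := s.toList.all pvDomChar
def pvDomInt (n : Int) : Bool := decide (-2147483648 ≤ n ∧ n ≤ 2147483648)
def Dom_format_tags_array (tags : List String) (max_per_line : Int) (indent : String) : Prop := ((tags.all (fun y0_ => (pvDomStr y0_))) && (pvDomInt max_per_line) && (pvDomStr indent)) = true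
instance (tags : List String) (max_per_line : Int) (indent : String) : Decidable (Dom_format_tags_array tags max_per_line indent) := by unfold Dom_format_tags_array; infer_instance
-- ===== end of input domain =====

-- B replaces A's dict-grouping helper by a single stable sort with a composite key; return values agree on Pre_.

-- shared helper: the expression f'"{tag}"' appearing in both sources
def pvQuote (t : String) : String := PySem.Str.join "" ["\"", t, "\""]

-- tag.split(':', 1)[0]
def pvPrefix (t : String) : String := ((PySem.Str.splitMax? t ":" 1).getD []).headD ""

-- ===== PORT A =====
def sort_tags_by_prefix (tags : List String) : List String :=
  if tags = [] then []
  else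
    -- grouping loop: prefix_groups (dict), no_prefix (list)
    let st := tags.foldl
      (fun (acc : PySem.Dict String (List String) × List String) tag =>
        if PySem.Str.isIn ":" tag then
          let pfx := pvPrefix tag
          let pg := if acc.1.contains pfx then acc.1 else acc.1.insert pfx []
          (pg.modify pfx [] (fun g => g ++ [tag]), acc.2)
        else
          (acc.1, acc.2 ++ [tag]))
      (PySem.Dict.empty, [])
    -- for prefix in prefix_groups: prefix_groups[prefix].sort()
    let pg := st.1.keys.foldl
      (fun d p => d.modify p [] (fun g => PySem.List.sorted g (fun x => x))) st.1
    -- no_prefix.sort()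
    let no_prefix := PySem.List.sorted st.2 (fun x => x)
    -- result = []; for prefix in sorted(prefix_groups.keys()): result.extend(...)
    let result := (PySem.List.sorted pg.keys (fun x => x)).foldl
      (fun r p => r ++ pg.getD p []) []
    result ++ no_prefix

def format_tags_array (tags : List String) (max_per_line : Int) (indent : String) : String :=
  if tags = [] then "[]"
  else
    let sorted_tags := sort_tags_by_prefix tags
    if (sorted_tags.length : Int) ≤ max_per_line then
      PySem.Str.join "" ["[ ", PySem.Str.join ", " (sorted_tags.map pvQuote), ",]"]
    else
      let lines := ["["]
      let lines := (PySem.List.pyRange 0 (sorted_tags.length : Int) max_per_line).foldl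
        (fun ls i =>
          let chunk := PySem.List.slice sorted_tags (some i) (some (i + max_per_line))
          ls ++ [PySem.Str.join "" ["  ", PySem.Str.join ", " (chunk.map pvQuote), ","]]) lines
      let lines := lines ++ ["]"]
      PySem.Str.join "\n" lines

-- ===== PORT B =====
-- the composite key (0, prefix, tag) for prefixed tags, (1, tag, "") for the rest
def pvTagKey (t : String) : Lex (String × String) :=
  if PySem.Str.isIn ":" t then toLex ("0" ++ pvPrefix t, t) else toLex ("1", t)

def format_tags_array_alt (tags : List String) (max_per_line : Int) (indent : String) : String :=
  if tags = [] then "[]"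
  else
    let sorted_tags := PySem.List.sorted tags pvTagKey
    if (sorted_tags.length : Int) ≤ max_per_line then
      PySem.Str.join "" ["[ ", PySem.Str.join ", " (sorted_tags.map pvQuote), ",]"]
    else
      let chunks := (PySem.List.pyRange 0 (sorted_tags.length : Int) max_per_line).map
        (fun i => PySem.List.slice sorted_tags (some i) (some (i + max_per_line)))
      PySem.Str.join "\n"
        (["["] ++ chunks.map (fun c => PySem.Str.join "" ["  ", PySem.Str.join ", " (c.map pvQuote), ","]) ++ ["]"])

-- ===== PRECONDITION & SPEC =====
-- Pre_ excludes only nonempty tags with max_per_line = 0, where Python's range(0, n, 0) raises ValueError (in both A and B).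
def Pre_format_tags_array (tags : List String) (max_per_line : Int) (indent : String) : Prop :=
  tags = [] ∨ max_per_line ≠ 0
instance (tags : List String) (max_per_line : Int) (indent : String) : Decidable (Pre_format_tags_array tags max_per_line indent) := by unfold Pre_format_tags_array; infer_instance

def pvWitness_format_tags_array : List String × Int × String := (["lang:python", "editor", "lang:c"], 2, "")

def Spec_format_tags_array (tags : List String) (max_per_line : Int) (indent : String) (out : String) : Prop := out = format_tags_array_alt tags max_per_line indent
instance (tags : List String) (max_per_line : Int) (indent : String) (out : String) : Decidable (Spec_format_tags_array tags max_per_line indent out) := by unfold Spec_format_tags_array; infer_instance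

-- ===== CLAIM (what is proved, stated in full; the proofs are below) =====
def Claim_equal_format_tags_array : Prop := ∀ (tags : List String) (max_per_line : Int) (indent : String), Dom_format_tags_array tags max_per_line indent → Pre_format_tags_array tags max_per_line indent → Spec_format_tags_array tags max_per_line indent (format_tags_array tags max_per_line indent)

-- ===== LEMMAS AND PROOFS =====

-- abbreviations used only by the proofs
theorem pv_flatten_singleton {α β : Type} (l : List α) (f : α → β) :
    (l.map (fun x => [f x])).flatten = l.map f := by
  induction l with
  | nil => simp
  | cons x xs ih => simp [ih]

def pvHasColon (t : String) : Bool := PySem.Str.isIn ":" t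

-- Step 1: the grouping loop, split into its two independent accumulators
theorem pv_modify_insert (d : PySem.Dict String (List String)) (k : String) (t : String) :
    ((if d.contains k then d else d.insert k []).modify k [] (fun g => g ++ [t]))
      = d.modify k [] (fun g => g ++ [t]) := by
  by_cases hcon : d.contains k = true
  · rw [if_pos hcon]
  · rw [if_neg hcon]
    simp only [PySem.Dict.modify, PySem.Dict.getD_insert_self,
      PySem.Dict.insert_insert_self,
      PySem.Dict.getD_of_not_contains d [] (Bool.not_eq_true _ ▸ hcon)]

theorem pv_fold_congr (tags : List String)
    (init : PySem.Dict String (List String) × List String) :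
    tags.foldl
      (fun (acc : PySem.Dict String (List String) × List String) tag =>
        if PySem.Str.isIn ":" tag then
          let pfx := pvPrefix tag
          let pg := if acc.1.contains pfx then acc.1 else acc.1.insert pfx []
          (pg.modify pfx [] (fun g => g ++ [tag]), acc.2)
        else
          (acc.1, acc.2 ++ [tag]))
      init =
    tags.foldl
      (fun (acc : PySem.Dict String (List String) × List String) tag =>
        if PySem.Str.isIn ":" tag then
          (acc.1.modify (pvPrefix tag) [] (fun g => g ++ [tag]), acc.2)
        else
          (acc.1, acc.2 ++ [tag]))
      init := by
  refine PySem.List.foldl_congr_mem _ _ _ _ ?_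
  intro acc x _
  by_cases hc : PySem.Str.isIn ":" x = true
  · simp only [if_pos hc, pv_modify_insert]
  · simp only [if_neg hc]

theorem pv_fold_eq (tags : List String) :
    ∀ (d : PySem.Dict String (List String)) (np : List String),
    tags.foldl
      (fun (acc : PySem.Dict String (List String) × List String) tag =>
        if PySem.Str.isIn ":" tag then
          (acc.1.modify (pvPrefix tag) [] (fun g => g ++ [tag]), acc.2)
        else
          (acc.1, acc.2 ++ [tag]))
      (d, np) =
    ((tags.filter pvHasColon).foldl
        (fun d t => d.modify (pvPrefix t) [] (fun g => g ++ [t])) d,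
      np ++ tags.filter (fun t => !pvHasColon t)) := by
  induction tags with
  | nil => intro d np; simp
  | cons x xs ih =>
    intro d np
    by_cases hc : PySem.Str.isIn ":" x = true
    · simp only [List.foldl_cons, if_pos hc]
      rw [ih]
      have h1 : pvHasColon x = true := hc
      simp [h1]
    · simp only [List.foldl_cons, if_neg hc]
      rw [ih]
      have h1 : pvHasColon x = false := Bool.not_eq_true _ ▸ hc
      simp [h1]

-- Step 2: the grouped dict, characterised
theorem pv_group_getD (l : List String) (p : String) :
    ((l.foldl (fun d t => d.modify (pvPrefix t) [] (fun g => g ++ [t])) PySem.Dict.empty).getD p [])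
      = l.filter (fun t => pvPrefix t == p) := by
  have hmap : l.foldl (fun d t => d.modify (pvPrefix t) [] (fun g => g ++ [t])) PySem.Dict.empty
      = (l.map (fun t => (pvPrefix t, t))).foldl
          (fun d q => d.modify q.1 [] (fun g => g ++ [q.2])) PySem.Dict.empty := by
    rw [List.foldl_map]
  rw [hmap, PySem.Dict.getD_foldl_modify_append]
  simp [List.filter_map, Function.comp_def]

theorem pv_group_keys (l : List String) :
    (l.foldl (fun d t => d.modify (pvPrefix t) [] (fun g => g ++ [t])) PySem.Dict.empty).keys
      = PySem.Set.ofList (l.map pvPrefix) := by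
  rw [PySem.Dict.keys_foldl_modify_key l pvPrefix [] (fun _ t => fun g => g ++ [t])]
  simp [PySem.Set.update, PySem.Set.ofList, PySem.Dict.keys_empty]

-- Step 3: sorting each bucket in place
theorem pv_sortfold_getD (ks : List String) (d : PySem.Dict String (List String)) (q : String)
    (hnd : ks.Nodup) :
    ((ks.foldl (fun d p => d.modify p [] (fun g => PySem.List.sorted g (fun x => x))) d).getD q [])
      = if q ∈ ks then PySem.List.sorted (d.getD q []) (fun x => x) else d.getD q [] := by
  induction ks generalizing d with
  | nil => simp
  | cons k ks ih =>
    have hk : k ∉ ks := (List.nodup_cons.mp hnd).1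
    rw [List.foldl_cons, ih _ (List.nodup_cons.mp hnd).2]
    by_cases hq : q = k
    · subst hq
      simp [hk]
    · simp [List.mem_cons, hq, PySem.Dict.getD_modify]

theorem pv_sortfold_keys (ks : List String) (d : PySem.Dict String (List String))
    (hks : ∀ p ∈ ks, p ∈ d.keys) :
    (ks.foldl (fun d p => d.modify p [] (fun g => PySem.List.sorted g (fun x => x))) d).keys = d.keys := by
  induction ks generalizing d with
  | nil => simp
  | cons k ks ih =>
    have hkeys : (d.modify k [] (fun g => PySem.List.sorted g (fun x => x))).keys = d.keys := by
      rw [PySem.Dict.keys_modify]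
      exact PySem.Dict.keys_insert_of_contains _ _
        ((PySem.Dict.contains_iff_mem_keys _ _).mpr (hks k List.mem_cons_self))
    rw [List.foldl_cons, ih _ (fun p hp => hkeys ▸ hks p (List.mem_cons_of_mem _ hp)), hkeys]

-- Step 4: grouping partitions the list (as a permutation)
theorem pv_flatMap_filter_perm (ks : List String) (l : List String) (key : String → String)
    (hnd : ks.Nodup) (hcov : ∀ x ∈ l, key x ∈ ks) :
    (ks.flatMap (fun p => l.filter (fun x => key x == p))).Perm l := by
  induction ks generalizing l with
  | nil =>
    have : l = [] := by
      cases l with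
      | nil => rfl
      | cons y ys => exact absurd (hcov y List.mem_cons_self) (by simp)
    simp [this]
  | cons k ks ih =>
    rw [List.flatMap_cons]
    have hrest : ∀ p ∈ ks, l.filter (fun x => key x == p)
        = (l.filter (fun x => !(key x == k))).filter (fun x => key x == p) := by
      intro p hp
      rw [List.filter_filter]
      refine (List.filter_congr ?_).symm
      intro x hx
      by_cases hxp : key x = p
      · have hxk : key x ≠ k := by
          rw [hxp]; intro h; exact (List.nodup_cons.mp hnd).1 (h ▸ hp)
        simp only [hxp]
        simp
        exact fun h => hxk (hxp.trans h)
      · simp [hxp]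
    have hmapc : ks.flatMap (fun p => l.filter (fun x => key x == p))
        = ks.flatMap (fun p => (l.filter (fun x => !(key x == k))).filter (fun x => key x == p)) := by
      rw [List.flatMap_def, List.flatMap_def, List.map_congr_left hrest]
    rw [hmapc]
    have hperm := ih (l.filter (fun x => !(key x == k))) (List.nodup_cons.mp hnd).2 ?_
    · exact (hperm.append_left _).trans (List.filter_append_perm (fun x => key x == k) l)
    · intro x hx
      have hmem := List.mem_filter.mp hx
      have hk2 : key x ≠ k := by simpa using hmem.2
      rcases List.mem_cons.mp (hcov x hmem.1) with h | h
      · exact absurd h hk2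
      · exact h

theorem pv_flatMap_perm_congr {α β : Type} (ks : List α) (f g : α → List β)
    (h : ∀ p ∈ ks, (f p).Perm (g p)) : (ks.flatMap f).Perm (ks.flatMap g) := by
  induction ks with
  | nil => simp
  | cons k ks ih =>
    rw [List.flatMap_cons, List.flatMap_cons]
    exact (h k List.mem_cons_self).append
      (ih (fun p hp => h p (List.mem_cons_of_mem _ hp)))

-- string-order facts about the marker prefixes
theorem pv_str_lt_pref (p q : String) : ("0" ++ p < "0" ++ q) ↔ p < q := by
  rw [String.lt_iff_toList_lt, String.lt_iff_toList_lt, String.toList_append, String.toList_append]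
  show ('0' :: p.toList) < ('0' :: q.toList) ↔ _
  rw [List.cons_lt_cons_iff]
  simp

theorem pv_str_lt_01 (p : String) : ("0" ++ p < "1") := by
  rw [String.lt_iff_toList_lt, String.toList_append]
  show ('0' :: p.toList) < ['1']
  rw [List.cons_lt_cons_iff]
  left
  decide

-- key-order facts
theorem pv_key_le_same (x y : String) (hx : pvHasColon x = true) (hy : pvHasColon y = true)
    (hp : pvPrefix x = pvPrefix y) (hxy : x ≤ y) : pvTagKey x ≤ pvTagKey y := by
  have hx' : PySem.Str.isIn ":" x = true := hx
  have hy' : PySem.Str.isIn ":" y = true := hy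
  unfold pvTagKey
  rw [if_pos hx', if_pos hy', Prod.Lex.le_iff]
  refine Or.inr ⟨?_, ?_⟩
  · simp only [ofLex_toLex, hp]
  · simpa only [ofLex_toLex] using hxy

theorem pv_key_le_lt (x y : String) (hx : pvHasColon x = true) (hy : pvHasColon y = true)
    (hp : pvPrefix x < pvPrefix y) : pvTagKey x ≤ pvTagKey y := by
  have hx' : PySem.Str.isIn ":" x = true := hx
  have hy' : PySem.Str.isIn ":" y = true := hy
  unfold pvTagKey
  rw [if_pos hx', if_pos hy', Prod.Lex.le_iff]
  refine Or.inl ?_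
  simp only [ofLex_toLex]
  exact (pv_str_lt_pref _ _).mpr hp

theorem pv_key_le_group (x y : String) (hx : pvHasColon x = true) (hy : pvHasColon y = false) :
    pvTagKey x ≤ pvTagKey y := by
  have hx' : PySem.Str.isIn ":" x = true := hx
  have hy' : PySem.Str.isIn ":" y = false := hy
  unfold pvTagKey
  rw [if_pos hx', if_neg (ne_true_of_eq_false hy'), Prod.Lex.le_iff]
  refine Or.inl ?_
  simp only [ofLex_toLex]
  exact pv_str_lt_01 _

theorem pv_key_le_np (x y : String) (hx : pvHasColon x = false) (hy : pvHasColon y = false)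
    (hxy : x ≤ y) : pvTagKey x ≤ pvTagKey y := by
  have hx' : PySem.Str.isIn ":" x = false := hx
  have hy' : PySem.Str.isIn ":" y = false := hy
  unfold pvTagKey
  rw [if_neg (ne_true_of_eq_false hx'), if_neg (ne_true_of_eq_false hy'), Prod.Lex.le_iff]
  refine Or.inr ⟨rfl, ?_⟩
  simpa only [ofLex_toLex] using hxy

theorem pv_key_inj : Function.Injective pvTagKey := by
  intro a b h
  unfold pvTagKey at h
  cases ha : PySem.Str.isIn ":" a <;> cases hb : PySem.Str.isIn ":" b <;>
    rw [ha, hb] at h <;>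
    simp only [cond_true, cond_false, Bool.false_eq_true, if_true, if_false, toLex_inj,
      Prod.mk.injEq] at h
  · exact h.2
  · exfalso
    have := congrArg String.toList h.1
    simp [String.toList_append] at this
  · exfalso
    have := congrArg String.toList h.1
    simp [String.toList_append] at this
  · exact h.2

theorem pv_pairwise_lt_of_le {l : List String} (hle : l.Pairwise (· ≤ ·)) (hnd : l.Nodup) :
    l.Pairwise (· < ·) :=
  (hle.and hnd).imp (fun h => lt_of_le_of_ne h.1 h.2)

theorem pv_pairwise_flatMap (ks : List String) (f : String → List String)
    (hks : ks.Pairwise (· < ·))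
    (hblock : ∀ p ∈ ks, (f p).Pairwise (· ≤ ·))
    (hmem : ∀ p ∈ ks, ∀ x ∈ f p, pvHasColon x = true ∧ pvPrefix x = p) :
    (ks.flatMap f).Pairwise (fun a b => pvTagKey a ≤ pvTagKey b) := by
  induction ks with
  | nil => simp
  | cons k ks ih =>
    rw [List.flatMap_cons, List.pairwise_append]
    refine ⟨?_, ?_, ?_⟩
    · refine (hblock k List.mem_cons_self).imp_of_mem ?_
      intro a b ha hb hab
      obtain ⟨hca, hpa⟩ := hmem k List.mem_cons_self a ha
      obtain ⟨hcb, hpb⟩ := hmem k List.mem_cons_self b hb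
      exact pv_key_le_same a b hca hcb (hpa.trans hpb.symm) hab
    · exact ih (List.pairwise_cons.mp hks).2
        (fun p hp => hblock p (List.mem_cons_of_mem _ hp))
        (fun p hp => hmem p (List.mem_cons_of_mem _ hp))
    · intro a ha b hb
      obtain ⟨p, hp, hbp⟩ := List.mem_flatMap.mp hb
      obtain ⟨hca, hpa⟩ := hmem k List.mem_cons_self a ha
      obtain ⟨hcb, hpb⟩ := hmem p (List.mem_cons_of_mem _ hp) b hbp
      refine pv_key_le_lt a b hca hcb ?_
      rw [hpa, hpb]
      exact (List.pairwise_cons.mp hks).1 p hp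

-- the heart: A's sort equals one stable sort by the composite key
theorem pv_sort_eq (tags : List String) (hne : tags ≠ []) :
    sort_tags_by_prefix tags = PySem.List.sorted tags pvTagKey := by
  unfold sort_tags_by_prefix
  rw [if_neg hne]
  rw [pv_fold_congr, pv_fold_eq]
  set L1 := tags.filter pvHasColon with hL1
  set NP := tags.filter (fun t => !pvHasColon t) with hNP
  set D := L1.foldl (fun d t => d.modify (pvPrefix t) [] (fun g => g ++ [t])) PySem.Dict.empty with hD
  simp only []
  have hkeys : D.keys = PySem.Set.ofList (L1.map pvPrefix) := pv_group_keys L1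
  have hknd : D.keys.Nodup := by rw [hkeys]; exact PySem.Set.nodup_ofList _
  have hpgkeys : (D.keys.foldl (fun d p => d.modify p [] (fun g => PySem.List.sorted g (fun x => x))) D).keys = D.keys :=
    pv_sortfold_keys D.keys D (fun p hp => hp)
  rw [hpgkeys]
  rw [PySem.List.foldl_append_eq_flatMap (fun p =>
    (D.keys.foldl (fun d p => d.modify p [] (fun g => PySem.List.sorted g (fun x => x))) D).getD p []) _ []]
  rw [List.nil_append]
  set KS := PySem.List.sorted D.keys (fun x => x) with hKS
  have hKSmem : ∀ p, p ∈ KS ↔ p ∈ D.keys := fun p => PySem.List.mem_sorted _ _ _ p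
  have hflatc : KS.flatMap (fun p =>
      (D.keys.foldl (fun d p => d.modify p [] (fun g => PySem.List.sorted g (fun x => x))) D).getD p []) =
      KS.flatMap (fun p => PySem.List.sorted (L1.filter (fun t => pvPrefix t == p)) (fun x => x)) := by
    rw [List.flatMap_def, List.flatMap_def]
    refine congrArg List.flatten (List.map_congr_left ?_)
    intro p hp
    rw [pv_sortfold_getD D.keys D p hknd, if_pos ((hKSmem p).mp hp), pv_group_getD]
  rw [hflatc]
  -- now prove the explicit list equals the key-sort, by perm + pairwise + injectivity
  have hgrp_mem : ∀ p x, x ∈ L1.filter (fun t => pvPrefix t == p) →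
      pvHasColon x = true ∧ pvPrefix x = p := by
    intro p x hx
    have h1 := List.mem_filter.mp hx
    have h2 := List.mem_filter.mp h1.1
    exact ⟨h2.2, by simpa using h1.2⟩
  have hKSnd : KS.Nodup := (PySem.List.sorted_perm D.keys (fun x => x) false).symm.nodup hknd
  have hKSlt : KS.Pairwise (· < ·) :=
    pv_pairwise_lt_of_le (PySem.List.sorted_pairwise D.keys (fun x => x)) hKSnd
  -- permutation with tags
  have hperm : (KS.flatMap (fun p => PySem.List.sorted (L1.filter (fun t => pvPrefix t == p)) (fun x => x))
      ++ PySem.List.sorted NP (fun x => x)).Perm tags := by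
    have h1 : (KS.flatMap (fun p => PySem.List.sorted (L1.filter (fun t => pvPrefix t == p)) (fun x => x))).Perm
        (KS.flatMap (fun p => L1.filter (fun t => pvPrefix t == p))) :=
      pv_flatMap_perm_congr _ _ _ (fun p _ => PySem.List.sorted_perm _ _ _)
    have h2 : (KS.flatMap (fun p => L1.filter (fun t => pvPrefix t == p))).Perm L1 := by
      refine pv_flatMap_filter_perm KS L1 pvPrefix hKSnd ?_
      intro x hx
      rw [hKSmem, hkeys]
      rw [PySem.Set.mem_ofList]
      exact List.mem_map.mpr ⟨x, hx, rfl⟩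
    exact ((h1.trans h2).append (PySem.List.sorted_perm NP (fun x => x) false)).trans
      (List.filter_append_perm pvHasColon tags)
  -- pairwise ordering by the composite key
  have hpw : (KS.flatMap (fun p => PySem.List.sorted (L1.filter (fun t => pvPrefix t == p)) (fun x => x))
      ++ PySem.List.sorted NP (fun x => x)).Pairwise (fun a b => pvTagKey a ≤ pvTagKey b) := by
    rw [List.pairwise_append]
    refine ⟨?_, ?_, ?_⟩
    · refine pv_pairwise_flatMap KS _ hKSlt ?_ ?_
      · intro p _; exact PySem.List.sorted_pairwise _ _
      · intro p _ x hx
        exact hgrp_mem p x ((PySem.List.mem_sorted _ _ _ x).mp hx)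
    · refine (PySem.List.sorted_pairwise NP (fun x => x)).imp_of_mem ?_
      intro a b ha hb hab
      have hca : pvHasColon a = false := by
        simpa using (List.mem_filter.mp ((PySem.List.mem_sorted _ _ _ a).mp ha)).2
      have hcb : pvHasColon b = false := by
        simpa using (List.mem_filter.mp ((PySem.List.mem_sorted _ _ _ b).mp hb)).2
      exact pv_key_le_np a b hca hcb hab
    · intro a ha b hb
      obtain ⟨p, hp, hap⟩ := List.mem_flatMap.mp ha
      have hca := (hgrp_mem p a ((PySem.List.mem_sorted _ _ _ a).mp hap)).1
      have hcb : pvHasColon b = false := by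
        simpa using (List.mem_filter.mp ((PySem.List.mem_sorted _ _ _ b).mp hb)).2
      exact pv_key_le_group a b hca hcb
  exact PySem.List.eq_of_perm_of_pairwise_le_of_injective pvTagKey pv_key_inj
    (hperm.trans (PySem.List.sorted_perm tags pvTagKey false).symm) hpw
    (PySem.List.sorted_pairwise tags pvTagKey)

-- ===== VERDICT (by name: the statement is the Claim_ definition above) =====
theorem format_tags_array_spec : Claim_equal_format_tags_array := by
  intro tags max_per_line indent _ _
  unfold Spec_format_tags_array format_tags_array format_tags_array_alt
  by_cases h : tags = []
  · simp [h]
  · rw [pv_sort_eq tags h]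
    by_cases hl : ((tags.length : Int)) ≤ max_per_line
    · simp [hl]
    · simp [h, hl, pv_flatten_singleton, Function.comp_def]
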